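-- pv_equiv track=rewrite | github.com/katkielbasa/adventOfCode | Day2/day2_1.py | find2and3letters
-- ===== SOURCE A (Python) =====
-- def find2and3letters(map):
--     counter2=0
--     counter3=0
--     for _, value in map.items():
--         if value==3:
--             counter3 = 1
--         if value==2:
--             counter2 =1
--     return counter2, counter3
-- ===== SOURCE B (Python) =====
-- def find2and3letters(map):
--     counts = {}
--     for value in map.values():
--         counts[value] = counts.get(value, 0) + 1
--     return min(1, counts.get(2, 0)), min(1, counts.get(3, 0))
-- ===== Notes on version B (the rewrite author's own statement) =====
-- stated objective: alternative
-- what changed: B builds a frequency dictionary of all values in one pass and then derives each flag as min(1, count), instead of A's loop that sets two boolean flags as it scans.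
import Mathlib
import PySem

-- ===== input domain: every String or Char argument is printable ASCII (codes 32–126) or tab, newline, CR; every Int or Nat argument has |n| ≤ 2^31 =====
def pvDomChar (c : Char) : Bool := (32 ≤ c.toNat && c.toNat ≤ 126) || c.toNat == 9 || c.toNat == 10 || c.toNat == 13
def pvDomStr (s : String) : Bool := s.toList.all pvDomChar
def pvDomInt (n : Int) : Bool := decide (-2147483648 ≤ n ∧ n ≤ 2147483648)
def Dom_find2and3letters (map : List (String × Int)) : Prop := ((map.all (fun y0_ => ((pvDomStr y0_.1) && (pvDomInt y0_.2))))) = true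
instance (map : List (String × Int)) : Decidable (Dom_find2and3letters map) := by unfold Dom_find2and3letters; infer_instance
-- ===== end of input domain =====

-- B builds a frequency dictionary of the values in one pass and derives each flag as min(1, count) (alternative; same cost).

-- ===== PORT A =====
def find2and3letters (map : List (String × Int)) : Int × Int :=
  map.foldl (fun (acc : Int × Int) kv =>
    let acc := if kv.2 == 3 then (acc.1, 1) else acc
    if kv.2 == 2 then ((1 : Int), acc.2) else acc) (0, 0)

-- ===== PORT B =====
def find2and3letters_alt (map : List (String × Int)) : Int × Int :=
  let counts : PySem.Dict Int Int :=
    (map.map Prod.snd).foldl (fun d v => d.insert v (d.getD v 0 + 1)) PySem.Dict.empty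
  (min 1 (counts.getD 2 0), min 1 (counts.getD 3 0))

-- ===== PRECONDITION & SPEC =====
def Spec_find2and3letters (map : List (String × Int)) (out : Int × Int) : Prop := out = find2and3letters_alt map
instance (map : List (String × Int)) (out : Int × Int) : Decidable (Spec_find2and3letters map out) := by unfold Spec_find2and3letters; infer_instance

-- ===== CLAIM =====
def Claim_equal_find2and3letters : Prop := ∀ (map : List (String × Int)), Dom_find2and3letters map → Spec_find2and3letters map (find2and3letters map)

-- ===== LEMMAS AND PROOFS =====
lemma flags_eq (map : List (String × Int)) (a b : Int × Int)
    (h2 : a.1 = if (2:Int) ∈ map.map Prod.snd then 1 else b.1)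
    (h3 : a.2 = if (3:Int) ∈ map.map Prod.snd then 1 else b.2) :
    map.foldl (fun (acc : Int × Int) kv =>
      let acc := if kv.2 == 3 then (acc.1, 1) else acc
      if kv.2 == 2 then ((1 : Int), acc.2) else acc) b = a := by
  induction map generalizing b with
  | nil => simp at h2 h3; exact (Prod.ext h2 h3).symm
  | cons hd tl ih =>
    simp only [List.foldl_cons]
    apply ih
    · by_cases h : hd.2 = 2 <;>
        simp_all [List.mem_cons] <;> split_ifs <;> simp_all
    · by_cases h : hd.2 = 3 <;>
        simp_all [List.mem_cons] <;> split_ifs <;> simp_all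

lemma min_one_count (xs : List Int) (v : Int) :
    min 1 ((xs.count v : Int)) = if v ∈ xs then 1 else 0 := by
  by_cases h : v ∈ xs
  · have h1 : 0 < xs.count v := List.count_pos_iff.mpr h
    rw [if_pos h]; omega
  · rw [if_neg h, List.count_eq_zero.mpr h]; simp

-- ===== VERDICT =====
theorem find2and3letters_spec : Claim_equal_find2and3letters := by
  intro map _
  unfold Spec_find2and3letters find2and3letters find2and3letters_alt
  apply flags_eq
  · simp [PySem.Dict.getD_foldl_insert_add_one, min_one_count]
  · simp [PySem.Dict.getD_foldl_insert_add_one, min_one_count]
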